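-- pv_equiv track=rewrite | github.com/chrisarseno/nexus | src/nexus/rag/context_window_manager.py | _dictionary_compress
-- ===== SOURCE A (Python) =====
-- from typing import Dict, Any, List, Optional, Tuple, Iterator, Set, Callable
--
-- def _dictionary_compress(text: str, dictionary: Dict[str, int]) -> Tuple[str, List[Tuple[int, int, int]]]:
--     """
--     Dictionary-based compression replacing common phrases with tokens.
--     Returns (remaining_text, list of (position, length, token_id)).
--     """
--     if not dictionary:
--         return text, []
--
--     replacements = []
--
--     # Sort dictionary by phrase length (longest first)
--     sorted_phrases = sorted(dictionary.keys(), key=len, reverse=True)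
--
--     # Find and record replacements
--     remaining = text
--     offset_adjustment = 0
--
--     for phrase in sorted_phrases:
--         token_id = dictionary[phrase]
--         pos = 0
--
--         while True:
--             idx = remaining.find(phrase, pos)
--             if idx == -1:
--                 break
--
--             replacements.append((idx + offset_adjustment, len(phrase), token_id))
--             # Replace with placeholder
--             remaining = remaining[:idx] + f"<T{token_id}>" + remaining[idx + len(phrase):]
--             pos = idx + len(f"<T{token_id}>")
--
--     return remaining, replacements
-- ===== SOURCE B (Python) =====
-- from typing import Dict, List, Tuple
--
-- def _dictionary_compress(text: str, dictionary: Dict[str, int]) -> Tuple[str, List[Tuple[int, int, int]]]: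
--     """
--     Dictionary-based compression replacing common phrases with tokens.
--     Instead of repeatedly calling find and rebuilding the string after every
--     match, B makes one character-by-character scan per phrase: at each index it
--     either copies the character or, on a phrase match (first-character test,
--     then startswith), emits the placeholder and jumps past the match, keeping a
--     running length delta for the recorded positions; the collected pieces are
--     joined once per phrase.
--     Returns (remaining_text, list of (position, length, token_id)).
--     """
--     if not dictionary:
--         return text, []
--
--     replacements = []
--     remaining = text
--
--     for phrase in sorted(dictionary, key=len, reverse=True):
--         tid = dictionary[phrase]
--         placeholder = f"<T{tid}>"
--         L = len(phrase)
--         p0 = phrase[0]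
--         out = []
--         i = 0
--         delta = 0
--         n = len(remaining)
--         sw = remaining.startswith
--         while i < n:
--             if remaining[i] == p0 and sw(phrase, i):
--                 replacements.append((i + delta, L, tid))
--                 out.append(placeholder)
--                 delta += len(placeholder) - L
--                 i += L
--             else:
--                 out.append(remaining[i])
--                 i += 1
--         remaining = "".join(out)
--
--     return remaining, replacements
-- ===== Notes on version B (the rewrite author's own statement) =====
-- stated objective: alternative
-- what changed: Instead of repeatedly calling find and rebuilding the whole string after every match, B makes one character-by-character scan per phrase (copy the character, or emit the placeholder and jump past a match, with a running length delta for recorded positions) and joins the collected pieces once; Pre_ excludes dictionaries containing an empty-string phrase, on which A's inner while-loop never terminates.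
import Mathlib
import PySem

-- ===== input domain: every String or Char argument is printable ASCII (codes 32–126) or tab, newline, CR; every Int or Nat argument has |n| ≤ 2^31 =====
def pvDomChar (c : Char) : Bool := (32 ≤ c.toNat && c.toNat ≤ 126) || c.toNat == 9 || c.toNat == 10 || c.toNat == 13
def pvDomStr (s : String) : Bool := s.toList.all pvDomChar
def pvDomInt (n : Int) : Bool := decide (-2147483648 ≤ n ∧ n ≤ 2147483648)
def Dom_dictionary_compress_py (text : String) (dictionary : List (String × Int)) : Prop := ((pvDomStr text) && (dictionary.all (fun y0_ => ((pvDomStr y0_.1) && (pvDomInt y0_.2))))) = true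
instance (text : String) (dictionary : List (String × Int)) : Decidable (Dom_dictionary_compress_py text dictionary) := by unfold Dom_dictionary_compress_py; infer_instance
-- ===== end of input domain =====

-- B replaces A's find-then-rebuild loop by a single character-by-character scan per
-- phrase (copy or match-and-jump, with a running length delta); objective: alternative.

-- ===== PORT A =====
-- f"<T{token_id}>"
def pvPlaceholder (tok : Int) : List Char := ['<', 'T'] ++ PySem.Int.toChars tok ++ ['>']

-- A's inner `while True` loop for one phrase: state (remaining, pos, replacements).
-- `off` is A's offset_adjustment (always 0 at the call site, never modified by A).
-- Fuel is a totality guard only: A's Python loops forever when `ph = []` (a dictionary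
-- with an empty-string key, excluded by Pre_); for a nonempty phrase the supplied fuel
-- `remaining.length + 1` is never exhausted (each match consumes ≥ 1 character of the
-- original remaining).
def pvALoop (ph : List Char) (tok : Int) (off : Int) :
    Nat → List Char → Int → List (Int × Int × Int) → List Char × List (Int × Int × Int)
  | 0, rem, _, acc => (rem, acc)
  | fuel + 1, rem, pos, acc =>
    let idx := PySem.Chars.findFrom rem ph pos  -- remaining.find(phrase, pos)
    if idx = -1 then (rem, acc)
    else
      let plc := pvPlaceholder tok
      pvALoop ph tok off fuel
        (rem.take idx.toNat ++ plc ++ rem.drop (idx.toNat + ph.length))  -- remaining[:idx] + plc + remaining[idx+len(phrase):], exact since 0 ≤ idx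
        (idx + (plc.length : Int))
        (acc ++ [(idx + off, (ph.length : Int), tok)])

def dictionary_compress_py (text : String) (dictionary : List (String × Int)) : String × (List (Int × Int × Int)) :=
  let d := PySem.Dict.ofList dictionary
  if d.items = [] then (text, [])
  else
    let sorted_phrases := PySem.List.sorted d.keys (fun p => PySem.Str.len p) true
    let st := sorted_phrases.foldl
      (fun (st : List Char × List (Int × Int × Int)) phrase =>
        pvALoop phrase.toList (d.getD phrase 0) 0 (st.1.length + 1) st.1 0 st.2)
      (text.toList, [])
    (String.ofList st.1, st.2)

-- ===== PORT B =====
-- B's inner `while i < n` scan for one phrase. The port recurses over the unscanned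
-- suffix s = remaining[i:] (so `i < n` is `s ≠ []`); `out` is B's list of collected
-- pieces (placeholders and single characters), flattened at the end = "".join(out).
-- Same fuel guard as A's loop (an empty phrase makes B's Python loop forever too).
def pvBScan (ph plc : List Char) (tok : Int) :
    Nat → List Char → Int → Int → List (List Char) → List (Int × Int × Int) →
    List Char × List (Int × Int × Int)
  | 0, s, _, _, out, acc => (out.flatten ++ s, acc)
  | fuel + 1, s, i, delta, out, acc =>
    match s with
    | [] => (out.flatten, acc)
    | c :: t =>
      -- remaining[i] == p0 and remaining.startswith(phrase, i); for the nonempty phrases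
      -- Pre_ admits, the first-character test is exactly the first step of isPrefixOf
      if PySem.Chars.startswith (c :: t) ph then
        pvBScan ph plc tok fuel ((c :: t).drop ph.length) (i + (ph.length : Int))
          (delta + (plc.length : Int) - (ph.length : Int)) (out ++ [plc])
          (acc ++ [(i + delta, (ph.length : Int), tok)])
      else
        pvBScan ph plc tok fuel t (i + 1) delta (out ++ [[c]]) acc

-- B's `for phrase in sorted(dictionary, key=len, reverse=True)` loop, as recursion
-- over the sorted phrase list with state (remaining, replacements).
def pvBOuter (d : PySem.Dict String Int) :
    List String → List Char → List (Int × Int × Int) → List Char × List (Int × Int × Int)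
  | [], rem, acc => (rem, acc)
  | phrase :: rest, rem, acc =>
    let tid := d.getD phrase 0
    let st := pvBScan phrase.toList (pvPlaceholder tid) tid (rem.length + 1) rem 0 0 [] acc
    pvBOuter d rest st.1 st.2

def dictionary_compress_py_alt (text : String) (dictionary : List (String × Int)) : String × (List (Int × Int × Int)) :=
  let d := PySem.Dict.ofList dictionary
  if d.items = [] then (text, [])
  else
    let st := pvBOuter d (PySem.List.sorted d.keys (fun p => PySem.Str.len p) true) text.toList []
    (String.ofList st.1, st.2)

-- ===== PRECONDITION & SPEC =====
-- Pre_ excludes dictionaries containing an empty-string phrase: on those A's inner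
-- `while True` loop never terminates (find("") always succeeds), so A returns nothing.
def Pre_dictionary_compress_py (text : String) (dictionary : List (String × Int)) : Prop :=
  ∀ p ∈ dictionary, p.1 ≠ ""
instance (text : String) (dictionary : List (String × Int)) : Decidable (Pre_dictionary_compress_py text dictionary) := by unfold Pre_dictionary_compress_py; infer_instance
def pvWitness_dictionary_compress_py : String × (List (String × Int)) := ("he said he did", [("he", 7), ("id", -2)])

def Spec_dictionary_compress_py (text : String) (dictionary : List (String × Int)) (out : String × (List (Int × Int × Int))) : Prop := out = dictionary_compress_py_alt text dictionary
instance (text : String) (dictionary : List (String × Int)) (out : String × (List (Int × Int × Int))) : Decidable (Spec_dictionary_compress_py text dictionary out) := by unfold Spec_dictionary_compress_py; infer_instance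

-- ===== CLAIM (what is proved, stated in full; the proofs are below) =====
def Claim_equal_dictionary_compress_py : Prop := ∀ (text : String) (dictionary : List (String × Int)), Dom_dictionary_compress_py text dictionary → Pre_dictionary_compress_py text dictionary → Spec_dictionary_compress_py text dictionary (dictionary_compress_py text dictionary)

-- ===== LEMMAS AND PROOFS =====

-- A prefix of a dropped suffix is an infix.
theorem pvInfix_of_prefix_drop {u ph : List Char} {m : Nat} (h : ph <+: u.drop m) :
    ph <:+: u :=
  h.isInfix.trans (List.drop_suffix m u).isInfix

-- If the phrase matches at position k, find(phrase, k) returns exactly k.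
theorem pvFindFrom_at (R ph : List Char) (k : Nat) (hk : k ≤ R.length)
    (h : ph <+: R.drop k) : PySem.Chars.findFrom R ph (k : Int) none = (k : Int) := by
  have hne : PySem.Chars.findFrom R ph (k : Int) none ≠ -1 := by
    intro hc
    exact (PySem.Chars.findFrom_natCast_eq_neg_one_iff R ph k hk).mp hc h.isInfix
  obtain ⟨h1, h2, h3⟩ := PySem.Chars.findFrom_natCast_spec R ph k hk hne
  set v := PySem.Chars.findFrom R ph (k : Int) none with hv
  have hv0 : (0 : Int) ≤ v := le_trans (by positivity) h1
  have hkv : k ≤ v.toNat := by omega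
  rcases Nat.lt_or_ge k v.toNat with hlt | hge
  · exact absurd h (h3 k le_rfl hlt)
  · omega

-- If the phrase does not match at position k, searching from k and from k+1 agree.
theorem pvFindFrom_skip (R ph : List Char) (k : Nat) (hk : k < R.length)
    (h : ¬ ph <+: R.drop k) :
    PySem.Chars.findFrom R ph (k : Int) none = PySem.Chars.findFrom R ph ((k + 1 : Nat) : Int) none := by
  have hk1 : k + 1 ≤ R.length := hk
  have hdropk : R.drop k = R[k] :: R.drop (k + 1) := List.drop_eq_getElem_cons hk
  by_cases h1 : PySem.Chars.findFrom R ph (k : Int) none = -1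
  · have hni := (PySem.Chars.findFrom_natCast_eq_neg_one_iff R ph k (le_of_lt hk)).mp h1
    have h2 : PySem.Chars.findFrom R ph ((k + 1 : Nat) : Int) none = -1 := by
      rw [PySem.Chars.findFrom_natCast_eq_neg_one_iff R ph (k + 1) hk1]
      intro hc
      exact hni (by rw [hdropk]; exact List.infix_cons_iff.mpr (Or.inr hc))
    rw [h1, h2]
  · obtain ⟨ha1, ha2, ha3⟩ := PySem.Chars.findFrom_natCast_spec R ph k (le_of_lt hk) h1
    set v1 := PySem.Chars.findFrom R ph (k : Int) none with hv1
    have hv10 : (0 : Int) ≤ v1 := le_trans (by positivity) ha1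
    have hkv1 : k ≤ v1.toNat := by omega
    have hkv1' : k + 1 ≤ v1.toNat := by
      rcases Nat.eq_or_lt_of_le hkv1 with he | hl
      · exact absurd (he ▸ ha2) h
      · omega
    have h2 : PySem.Chars.findFrom R ph ((k + 1 : Nat) : Int) none ≠ -1 := by
      intro hc
      have hni := (PySem.Chars.findFrom_natCast_eq_neg_one_iff R ph (k + 1) hk1).mp hc
      have : ph <+: (R.drop (k + 1)).drop (v1.toNat - (k + 1)) := by
        rw [List.drop_drop]
        have harith : k + 1 + (v1.toNat - (k + 1)) = v1.toNat := by omega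
        rwa [harith]
      exact hni (pvInfix_of_prefix_drop this)
    obtain ⟨hb1, hb2, hb3⟩ := PySem.Chars.findFrom_natCast_spec R ph (k + 1) hk1 h2
    set v2 := PySem.Chars.findFrom R ph ((k + 1 : Nat) : Int) none with hv2
    have hv20 : (0 : Int) ≤ v2 := le_trans (by positivity) hb1
    have hkv2 : k + 1 ≤ v2.toNat := by omega
    rcases Nat.lt_trichotomy v1.toNat v2.toNat with hlt | heq | hgt
    · exact absurd ha2 (hb3 v1.toNat hkv1' hlt)
    · omega
    · exact absurd hb2 (ha3 v2.toNat (by omega) hgt)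

-- A's loop ignores a position step over a non-matching index.
theorem pvALoop_shift (ph : List Char) (tok off : Int) (fuel : Nat) (R : List Char)
    (k : Nat) (acc : List (Int × Int × Int)) (hk : k < R.length) (h : ¬ ph <+: R.drop k) :
    pvALoop ph tok off (fuel + 1) R (k : Int) acc
      = pvALoop ph tok off (fuel + 1) R ((k : Int) + 1) acc := by
  have hcast : ((k : Int) + 1) = ((k + 1 : Nat) : Int) := by push_cast; ring
  simp only [pvALoop, hcast, pvFindFrom_skip R ph k hk h]

-- Lockstep equivalence of the two inner loops. B's state (s, i, delta, out) with
-- s = remaining[i:] corresponds to A's state remaining = out.flatten ++ s,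
-- pos = out.flatten.length, with delta = out.flatten.length - i.
theorem pvScan_eq (ph plc : List Char) (tok : Int) (hph : ph ≠ [])
    (hplc : plc = pvPlaceholder tok) :
    ∀ (fuelB : Nat) (s : List Char) (i : Nat) (out : List (List Char))
      (acc : List (Int × Int × Int)) (fuelA : Nat),
      s.length + 1 ≤ fuelA → s.length + 1 ≤ fuelB →
      pvALoop ph tok 0 fuelA (out.flatten ++ s) ((out.flatten.length : Int)) acc
        = pvBScan ph plc tok fuelB s (i : Int) ((out.flatten.length : Int) - (i : Int)) out acc := by
  intro fuelB
  induction fuelB with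
  | zero => intro s i out acc fuelA hA hB; omega
  | succ fb IH =>
    intro s i out acc fuelA hA hB
    match fuelA, hA with
    | fa + 1, hA =>
    cases s with
    | nil =>
      have hidx : PySem.Chars.findFrom out.flatten ph ((out.flatten.length : Int)) none = -1 := by
        rw [PySem.Chars.findFrom_natCast_eq_neg_one_iff out.flatten ph out.flatten.length le_rfl,
          List.drop_length]
        intro hc
        exact hph (List.infix_nil.mp hc)
      rw [List.append_nil]
      simp only [pvALoop, pvBScan]
      rw [hidx]
      simp
    | cons c t =>
      have hk : out.flatten.length ≤ (out.flatten ++ c :: t).length := by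
        simp [List.length_append]
      have hRk : (out.flatten ++ c :: t).drop out.flatten.length = c :: t := List.drop_left
      have hph1 : 1 ≤ ph.length := List.length_pos_iff.mpr hph
      by_cases hpre : ph <+: (c :: t)
      · -- phrase matches at the current position
        have hfit : ph.length ≤ (c :: t).length := hpre.length_le
        have hidx : PySem.Chars.findFrom (out.flatten ++ c :: t) ph ((out.flatten.length : Int)) none
            = (out.flatten.length : Int) :=
          pvFindFrom_at _ ph out.flatten.length hk (by rw [hRk]; exact hpre)
        have hsw : PySem.Chars.startswith (c :: t) ph = true := by
          simpa [PySem.Chars.startswith] using (List.isPrefixOf_iff_prefix).mpr hpre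
        have hIH := IH ((c :: t).drop ph.length) (i + ph.length) (out ++ [plc])
          (acc ++ [((out.flatten.length : Int), (ph.length : Int), tok)]) fa
          (by simp only [List.length_drop, List.length_cons] at *; omega)
          (by simp only [List.length_drop, List.length_cons] at *; omega)
        simp only [pvALoop, pvBScan, hidx, hsw, if_true]
        rw [if_neg (by omega : ¬((out.flatten.length : Int) = -1))]
        convert hIH using 2
        all_goals solve
          | exact hplc.symm
          | (rw [Int.toNat_natCast, List.take_left, List.drop_length_add_append, hplc]
             simp [List.append_assoc])
          | (try simp only [List.flatten_append, List.flatten_cons, List.flatten_nil,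
               List.append_nil, List.length_append,
               List.append_cancel_left_eq, List.cons.injEq, Prod.mk.injEq, and_true]
             try push_cast
             try rw [hplc]
             try omega)
      · -- no match here: copy one character
        have hsw : PySem.Chars.startswith (c :: t) ph = false := by
          simp only [PySem.Chars.startswith]
          rw [Bool.eq_false_iff]
          intro hc
          exact hpre ((List.isPrefixOf_iff_prefix).mp hc)
        have hklt : out.flatten.length < (out.flatten ++ c :: t).length := by
          simp [List.length_append]
        have hshift := pvALoop_shift ph tok 0 fa (out.flatten ++ c :: t) out.flatten.length acc
          hklt (by rw [hRk]; exact hpre)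
        have hIH := IH t (i + 1) (out ++ [[c]]) acc (fa + 1)
          (by simp only [List.length_cons] at hA; omega)
          (by simp only [List.length_cons] at hB; omega)
        simp only [pvBScan, hsw, Bool.false_eq_true, if_false]
        rw [hshift]
        convert hIH using 2
        all_goals solve
          | (simp [List.append_assoc])
          | (try simp only [List.flatten_append, List.flatten_cons, List.flatten_nil,
               List.append_nil, List.length_append]
             try push_cast
             try omega)

-- The outer loops agree phrase by phrase.
theorem pvOuter_eq (d : PySem.Dict String Int) :
    ∀ (ps : List String) (rem : List Char) (acc : List (Int × Int × Int)),
      (∀ p ∈ ps, p.toList ≠ []) →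
      pvBOuter d ps rem acc
        = ps.foldl
            (fun (st : List Char × List (Int × Int × Int)) phrase =>
              pvALoop phrase.toList (d.getD phrase 0) 0 (st.1.length + 1) st.1 0 st.2)
            (rem, acc) := by
  intro ps
  induction ps with
  | nil => intro rem acc _; simp [pvBOuter]
  | cons p rest IH =>
    intro rem acc hne
    have hp : p.toList ≠ [] := hne p List.mem_cons_self
    have hmain := pvScan_eq p.toList (pvPlaceholder (d.getD p 0)) (d.getD p 0) hp rfl
      (rem.length + 1) rem 0 [] acc (rem.length + 1) le_rfl le_rfl
    simp only [List.flatten_nil, List.nil_append, List.length_nil, Nat.cast_zero,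
      sub_zero] at hmain
    simp only [pvBOuter, List.foldl_cons]
    rw [IH _ _ (fun q hq => hne q (List.mem_cons_of_mem p hq))]
    rw [← hmain, Prod.mk.eta]

-- Keys of ofList come from the association list.
theorem pvMem_keys_ofList (l : List (String × Int)) (k : String)
    (h : k ∈ (PySem.Dict.ofList l).keys) : k ∈ l.map Prod.fst := by
  rw [PySem.Dict.ofList, PySem.Dict.update] at h
  have he := PySem.Dict.keys_foldl_insert_key (κ := String) (ν := Int) l Prod.fst
    (fun d x => x.2) PySem.Dict.empty
  simp only at he
  rw [he] at h
  rcases (PySem.Set.mem_update _ _ _).mp h with h | h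
  · simp [PySem.Dict.keys_empty] at h
  · exact h

-- ===== VERDICT (by name: the statement is the Claim_ definition above) =====
theorem dictionary_compress_py_spec : Claim_equal_dictionary_compress_py := by
  intro text dictionary _ hpre
  unfold Spec_dictionary_compress_py dictionary_compress_py dictionary_compress_py_alt
  simp only
  split
  · rfl
  · rw [pvOuter_eq]
    intro p hp hnil
    have hpk : p ∈ (PySem.Dict.ofList dictionary).keys :=
      (PySem.List.mem_sorted _ _ _ _).mp hp
    rcases List.mem_map.mp (pvMem_keys_ofList dictionary p hpk) with ⟨pair, hpair, hfst⟩
    apply hpre pair hpair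
    rw [hfst]
    have := congrArg String.ofList hnil
    simpa using this
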